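-- pv_equiv track=rewrite | github.com/pradhann/FPL-MCP | tools/video_tools.py | _summarise_general
-- ===== SOURCE A (Python) =====
-- from typing import Dict, List, Optional
--
-- def _summarise_general(transcript: List[str], max_chars: int = 800) -> str:
--     """Create a brief summary of the overall video content.
--
--     This function concatenates transcript lines until the character
--     limit is reached.  It skips empty lines and trims whitespace.
--     """
--     summary_lines: List[str] = []
--     total_chars = 0
--     for line in transcript:
--         if not line.strip():
--             continue
--         if total_chars + len(line) + 1 > max_chars:
--             break
--         summary_lines.append(line.strip())
--         total_chars += len(line) + 1
--     return " ".join(summary_lines).strip()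
-- ===== SOURCE B (Python) =====
-- def _summarise_general(transcript, max_chars=800):
--     # Filter/strip once, prefix-sum the costs, then count how many running
--     # totals fit and join that prefix.
--     kept = [(line.strip(), len(line) + 1) for line in transcript if line.strip()]
--     totals = []
--     run = 0
--     for _, cost in kept:
--         run += cost
--         totals.append(run)
--     n = sum(1 for t in totals if t <= max_chars)
--     return " ".join(word for word, _ in kept[:n]).strip()
-- ===== Notes on version B (the rewrite author's own statement) =====
-- stated objective: alternative
-- what changed: Replaces the single break-on-overflow accumulation loop with a filter-and-strip pass, an explicit prefix-sum of the unstripped costs, a count of the running totals that fit (valid because the totals are strictly increasing), and a join of that prefix.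
import Mathlib
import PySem

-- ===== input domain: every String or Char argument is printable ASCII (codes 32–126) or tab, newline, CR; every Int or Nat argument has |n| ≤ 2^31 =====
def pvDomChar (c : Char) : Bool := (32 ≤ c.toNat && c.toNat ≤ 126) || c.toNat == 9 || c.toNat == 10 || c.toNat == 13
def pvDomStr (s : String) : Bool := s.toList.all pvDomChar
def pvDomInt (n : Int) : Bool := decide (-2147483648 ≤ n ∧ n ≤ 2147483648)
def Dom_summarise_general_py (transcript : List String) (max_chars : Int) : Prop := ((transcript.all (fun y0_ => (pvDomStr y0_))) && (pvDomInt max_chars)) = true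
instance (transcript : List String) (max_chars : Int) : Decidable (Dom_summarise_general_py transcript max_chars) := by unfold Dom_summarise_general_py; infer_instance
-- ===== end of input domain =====

-- B replaces A's break-on-overflow accumulation loop by filter + prefix sums + count-of-fitting-totals + join of that prefix (objective: alternative decomposition, same cost).

-- ===== PORT A =====
-- A's for-loop with break: structural recursion over the transcript carrying (summary_lines, total_chars).
def pvALoop (max_chars : Int) : List String → List String × Int → List String × Int
  | [], st => st
  | line :: rest, (acc, total) =>
    if PySem.Str.strip line == "" then pvALoop max_chars rest (acc, total)
    else if total + PySem.Str.len line + 1 > max_chars then (acc, total)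
    else pvALoop max_chars rest (acc ++ [PySem.Str.strip line], total + PySem.Str.len line + 1)

def summarise_general_py (transcript : List String) (max_chars : Int) : String :=
  PySem.Str.strip (PySem.Str.join " " (pvALoop max_chars transcript ([], (0 : Int))).1)

-- ===== PORT B =====
-- B's comprehension: (stripped line, cost) for each non-blank line.
def pvKeptB (transcript : List String) : List (String × Int) :=
  (transcript.filter (fun line => !(PySem.Str.strip line == ""))).map
    (fun line => (PySem.Str.strip line, PySem.Str.len line + 1))

def summarise_general_py_alt (transcript : List String) (max_chars : Int) : String :=
  let kept := pvKeptB transcript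
  let totals := (kept.foldl (fun (st : List Int × Int) p => (st.1 ++ [st.2 + p.2], st.2 + p.2)) ([], (0 : Int))).1
  let n := totals.countP (fun t => decide (t ≤ max_chars))
  PySem.Str.strip (PySem.Str.join " " ((kept.take n).map Prod.fst))

-- ===== PRECONDITION & SPEC =====
def Spec_summarise_general_py (transcript : List String) (max_chars : Int) (out : String) : Prop := out = summarise_general_py_alt transcript max_chars
instance (transcript : List String) (max_chars : Int) (out : String) : Decidable (Spec_summarise_general_py transcript max_chars out) := by unfold Spec_summarise_general_py; infer_instance

-- ===== CLAIM (what is proved, stated in full; the proofs are below) =====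
def Claim_equal_summarise_general_py : Prop := ∀ (transcript : List String) (max_chars : Int), Dom_summarise_general_py transcript max_chars → Spec_summarise_general_py transcript max_chars (summarise_general_py transcript max_chars)

-- ===== LEMMAS AND PROOFS =====

-- A's loop with the accumulator hoisted out.
def pvGPrefix (max_chars : Int) : List String → Int → List String
  | [], _ => []
  | line :: rest, total =>
    if PySem.Str.strip line == "" then pvGPrefix max_chars rest total
    else if total + PySem.Str.len line + 1 > max_chars then []
    else PySem.Str.strip line :: pvGPrefix max_chars rest (total + PySem.Str.len line + 1)

-- prefix sums starting at run
def pvSums (run : Int) : List Int → List Int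
  | [] => []
  | c :: cs => (run + c) :: pvSums (run + c) cs

theorem pvKeptB_cons_blank (l : String) (rest : List String)
    (h : (PySem.Str.strip l == "") = true) : pvKeptB (l :: rest) = pvKeptB rest := by
  simp [pvKeptB, h]

theorem pvKeptB_cons_kept (l : String) (rest : List String)
    (h : ¬ (PySem.Str.strip l == "") = true) :
    pvKeptB (l :: rest) = (PySem.Str.strip l, PySem.Str.len l + 1) :: pvKeptB rest := by
  simp [pvKeptB, h]

theorem pvALoop_fst (max_chars : Int) (ts : List String) (acc : List String) (total : Int) :
    (pvALoop max_chars ts (acc, total)).1 = acc ++ pvGPrefix max_chars ts total := by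
  induction ts generalizing acc total with
  | nil => simp [pvALoop, pvGPrefix]
  | cons l rest ih =>
    simp only [pvALoop, pvGPrefix]
    by_cases h : (PySem.Str.strip l == "") = true
    · rw [if_pos h, if_pos h, ih]
    · rw [if_neg h, if_neg h]
      by_cases hgt : total + PySem.Str.len l + 1 > max_chars
      · rw [if_pos hgt, if_pos hgt]; simp
      · rw [if_neg hgt, if_neg hgt, ih]; simp

theorem pvFoldl_fst (ps : List (String × Int)) (acc : List Int) (run : Int) :
    (ps.foldl (fun (st : List Int × Int) p => (st.1 ++ [st.2 + p.2], st.2 + p.2)) (acc, run)).1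
      = acc ++ pvSums run (ps.map Prod.snd) := by
  induction ps generalizing acc run with
  | nil => simp [pvSums]
  | cons p rest ih => simp [pvSums, ih]

theorem pvCount_zero (max_chars : Int) (cs : List Int) (run : Int)
    (hpos : ∀ c ∈ cs, 1 ≤ c) (hlt : max_chars < run) :
    (pvSums run cs).countP (fun t => decide (t ≤ max_chars)) = 0 := by
  induction cs generalizing run with
  | nil => simp [pvSums]
  | cons c rest ih =>
    have hc : 1 ≤ c := hpos c (by simp)
    have hno : ¬ (run + c ≤ max_chars) := by omega
    simp [pvSums, hno, ih (run + c) (fun x hx => hpos x (by simp [hx])) (by omega)]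

theorem pvKept_cost_pos (ts : List String) : ∀ p ∈ pvKeptB ts, 1 ≤ p.2 := by
  intro p hp
  simp only [pvKeptB, List.mem_map] at hp
  obtain ⟨l, _, rfl⟩ := hp
  have hnn : (0 : Int) ≤ PySem.Str.len l := by
    rw [PySem.Str.len_eq]; exact Int.natCast_nonneg _
  simp only []
  omega

theorem pvMain (max_chars : Int) (ts : List String) (total : Int) :
    pvGPrefix max_chars ts total =
      ((pvKeptB ts).take
        ((pvSums total ((pvKeptB ts).map Prod.snd)).countP (fun t => decide (t ≤ max_chars)))).map
        Prod.fst := by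
  induction ts generalizing total with
  | nil => simp [pvGPrefix, pvKeptB, pvSums]
  | cons l rest ih =>
    simp only [pvGPrefix]
    by_cases h : (PySem.Str.strip l == "") = true
    · rw [if_pos h, pvKeptB_cons_blank l rest h]; exact ih total
    · rw [if_neg h, pvKeptB_cons_kept l rest h]
      simp only [List.map_cons, pvSums, List.countP_cons]
      by_cases hgt : total + PySem.Str.len l + 1 > max_chars
      · rw [if_pos hgt]
        have hz := pvCount_zero max_chars ((pvKeptB rest).map Prod.snd)
          (total + (PySem.Str.len l + 1))
          (by intro c hc
              simp only [List.mem_map] at hc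
              obtain ⟨p, hp, rfl⟩ := hc
              exact pvKept_cost_pos rest p hp)
          (by omega)
        rw [hz]
        have hnle : ¬ (total + (PySem.Str.len l + 1) ≤ max_chars) := by omega
        have hL : PySem.Str.len l = (l.length : Int) := by rw [PySem.Str.len_eq]; simp
        simp
        rw [hL] at hgt
        omega
      · rw [if_neg hgt]
        have hle : total + (PySem.Str.len l + 1) ≤ max_chars := by omega
        have hL : PySem.Str.len l = (l.length : Int) := by rw [PySem.Str.len_eq]; simp
        simp only [hle, decide_true, if_pos]
        rw [show total + PySem.Str.len l + 1 = total + (PySem.Str.len l + 1) by ring]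
        simp only [List.take_succ_cons, List.map_cons, List.cons.injEq, true_and]
        exact ih (total + (PySem.Str.len l + 1))

-- ===== VERDICT (by name: the statement is the Claim_ definition above) =====
theorem summarise_general_py_spec : Claim_equal_summarise_general_py := by
  intro transcript max_chars _
  show _ = _
  simp only [summarise_general_py, summarise_general_py_alt, pvALoop_fst, pvFoldl_fst,
    List.nil_append]
  rw [pvMain]
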